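-- pv_equiv track=rewrite | github.com/gmelanso/GCKG | multiprocess.py | _categorize_data
-- ===== SOURCE A (Python) =====
-- def _categorize_data(urls_dict):
--     return {
--         category:
--             {
--                 url: value for url, value in urls_dict.items() if category in url and value is not None
--             }
--
--             for category in ["travel", "contract", "hospitality"]
--         }
-- ===== SOURCE B (Python) =====
-- def _categorize_data(urls_dict):
--     travel, contract, hospitality = {}, {}, {}
--     for url, value in urls_dict.items():
--         if value is None:
--             continue
--         if "travel" in url:
--             travel[url] = value
--         if "contract" in url:
--             contract[url] = value
--         if "hospitality" in url:
--             hospitality[url] = value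
--     return {"travel": travel, "contract": contract, "hospitality": hospitality}
-- ===== Notes on version B (the rewrite author's own statement) =====
-- stated objective: simpler
-- what changed: A scans the whole dict once per category (three filtering passes inside a nested dict comprehension); B makes a single pass over urls_dict.items(), dispatching each non-null entry into the three prebuilt buckets.
import Mathlib
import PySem

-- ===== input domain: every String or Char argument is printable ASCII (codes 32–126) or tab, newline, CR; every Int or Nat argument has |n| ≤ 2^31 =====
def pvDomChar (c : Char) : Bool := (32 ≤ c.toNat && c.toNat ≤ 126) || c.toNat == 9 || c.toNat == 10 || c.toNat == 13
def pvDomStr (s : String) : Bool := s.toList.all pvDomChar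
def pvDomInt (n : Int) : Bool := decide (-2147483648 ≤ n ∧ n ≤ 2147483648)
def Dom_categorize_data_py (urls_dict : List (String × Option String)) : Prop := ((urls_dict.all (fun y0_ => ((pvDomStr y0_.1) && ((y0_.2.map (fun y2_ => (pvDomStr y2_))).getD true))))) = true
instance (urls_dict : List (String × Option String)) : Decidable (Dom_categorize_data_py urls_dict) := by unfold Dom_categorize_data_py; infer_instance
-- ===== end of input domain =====

-- B makes one pass dispatching each non-null entry into three prebuilt buckets instead of A's three full scans.

-- ===== PORT A =====
-- A: nested dict comprehension — for each category, one full filtering scan of urls_dict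
-- (keys are distinct, coming from a Python dict, so the inner comprehension is a filter)
def categorize_data_py (urls_dict : List (String × Option String)) : List (String × List (String × Option String)) :=
  ["travel", "contract", "hospitality"].map (fun category =>
    (category, urls_dict.filter (fun p => PySem.Str.isIn category p.1 && p.2.isSome)))

-- ===== PORT B =====
-- B: one fold over urls_dict, three bucket accumulators (travel, contract, hospitality)
def categorize_data_py_alt (urls_dict : List (String × Option String)) : List (String × List (String × Option String)) :=
  let acc := urls_dict.foldl
    (fun (acc : List (String × Option String) × List (String × Option String) × List (String × Option String)) p =>
      match p.2 with
      | none => acc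
      | some _ =>
        let travel := if PySem.Str.isIn "travel" p.1 then acc.1 ++ [p] else acc.1
        let contract := if PySem.Str.isIn "contract" p.1 then acc.2.1 ++ [p] else acc.2.1
        let hospitality := if PySem.Str.isIn "hospitality" p.1 then acc.2.2 ++ [p] else acc.2.2
        (travel, contract, hospitality))
    ([], [], [])
  [("travel", acc.1), ("contract", acc.2.1), ("hospitality", acc.2.2)]

-- ===== PRECONDITION & SPEC =====
def Spec_categorize_data_py (urls_dict : List (String × Option String)) (out : List (String × List (String × Option String))) : Prop := out = categorize_data_py_alt urls_dict
instance (urls_dict : List (String × Option String)) (out : List (String × List (String × Option String))) : Decidable (Spec_categorize_data_py urls_dict out) := by unfold Spec_categorize_data_py; infer_instance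

-- ===== CLAIM (what is proved, stated in full; the proofs are below) =====
def Claim_equal_categorize_data_py : Prop := ∀ (urls_dict : List (String × Option String)), Dom_categorize_data_py urls_dict → Spec_categorize_data_py urls_dict (categorize_data_py urls_dict)

-- ===== LEMMAS AND PROOFS =====

-- loop invariant: B's fold appends, to each accumulator, exactly A's filter for that category
theorem pv_fold_eq (l : List (String × Option String))
    (t c h : List (String × Option String)) :
    l.foldl
      (fun (acc : List (String × Option String) × List (String × Option String) × List (String × Option String)) p =>
        match p.2 with
        | none => acc
        | some _ =>
          let travel := if PySem.Str.isIn "travel" p.1 then acc.1 ++ [p] else acc.1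
          let contract := if PySem.Str.isIn "contract" p.1 then acc.2.1 ++ [p] else acc.2.1
          let hospitality := if PySem.Str.isIn "hospitality" p.1 then acc.2.2 ++ [p] else acc.2.2
          (travel, contract, hospitality))
      (t, c, h)
    = (t ++ l.filter (fun p => PySem.Str.isIn "travel" p.1 && p.2.isSome),
       c ++ l.filter (fun p => PySem.Str.isIn "contract" p.1 && p.2.isSome),
       h ++ l.filter (fun p => PySem.Str.isIn "hospitality" p.1 && p.2.isSome)) := by
  induction l generalizing t c h with
  | nil => simp
  | cons p rest ih =>
    obtain ⟨u, v⟩ := p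
    cases v with
    | none => simpa using ih t c h
    | some w =>
      simp only [List.foldl_cons, List.filter_cons]
      rw [ih]
      simp only [Option.isSome_some, Bool.and_true]
      split_ifs <;> simp_all

-- ===== VERDICT (by name: the statement is the Claim_ definition above) =====
theorem categorize_data_py_spec : Claim_equal_categorize_data_py := by
  intro urls_dict _
  unfold Spec_categorize_data_py categorize_data_py categorize_data_py_alt
  rw [pv_fold_eq]
  simp
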